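-- pv_equiv track=rewrite | github.com/HackerSchool/recrutamento-2021-22-s2 | python/josé_lopes/calculator.py | signExpression
-- ===== SOURCE A (Python) =====
-- def signExpression(exp):
--
--   for i in range(len(exp)-1):
--     if(exp[i] == "-" or exp[i] == "+"):
--       if(exp[i+1] == "-" or exp[i+1] == "+"):
--         bump = 0
--         sign = 1
--         for k in range(i, len(exp)):
--           if(exp[k] == "-"):
--             bump += 1
--             sign *= -1
--           elif(exp[k] == "+"):
--             bump+= 1
--           else:
--             break
--
--         if(sign == -1):
--           exp = exp[:i] + "-" + exp[i+bump:]
--         else: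
--           if(i != 0): exp = exp[:i] + "+" + exp[i+bump:]
--           else: exp = exp[i+bump:]
--
--         return exp
--
--   return
-- ===== SOURCE B (Python) =====
-- def signExpression(exp):
--     n = len(exp)
--     run_start = None
--     minus = 0
--     j = 0
--     while j < n:
--         c = exp[j]
--         if c == "+" or c == "-":
--             if run_start is None:
--                 run_start = j
--                 minus = 0
--             if c == "-":
--                 minus += 1
--         else:
--             if run_start is not None and j - run_start >= 2:
--                 break
--             run_start = None
--         j += 1
--     if run_start is None or j - run_start < 2:
--         return None
--     i = run_start
--     repl = "-" if minus % 2 == 1 else ("" if i == 0 else "+")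
--     return exp[:i] + repl + exp[j:]
-- ===== Notes on version B (the rewrite author's own statement) =====
-- stated objective: alternative
-- what changed: A uses nested loops (an outer index scan restarting a guard at every position plus an inner loop re-walking the run with a multiplicative sign accumulator); B is a single-pass state machine that tracks the current sign-run start and its minus-count parity and never re-reads a character.
import Mathlib
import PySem

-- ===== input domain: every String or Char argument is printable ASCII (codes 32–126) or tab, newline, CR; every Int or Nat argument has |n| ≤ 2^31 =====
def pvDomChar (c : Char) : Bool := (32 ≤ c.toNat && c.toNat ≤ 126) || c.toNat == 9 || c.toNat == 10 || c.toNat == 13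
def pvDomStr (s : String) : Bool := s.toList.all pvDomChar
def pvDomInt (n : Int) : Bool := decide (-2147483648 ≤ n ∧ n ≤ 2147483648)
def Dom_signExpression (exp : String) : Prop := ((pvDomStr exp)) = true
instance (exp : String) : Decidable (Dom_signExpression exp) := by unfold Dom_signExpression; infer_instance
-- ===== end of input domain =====

-- B collapses the first run of consecutive signs by one structural recursive pass instead of A's
-- nested index loops with slicing; objective: simpler (same asymptotic cost).

-- ===== PORT A =====
-- inner `for k in range(i, len(exp))` loop: counts the sign run (bump) and its parity (sign);
-- indices stay in range in every use, so getD is exact here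
def pvInnerA (cs : List Char) (k : Nat) (bump : Nat) (sign : Int) : Nat × Int :=
  if k < cs.length then
    if cs.getD k ' ' == '-' then pvInnerA cs (k+1) (bump+1) (sign * (-1))
    else if cs.getD k ' ' == '+' then pvInnerA cs (k+1) (bump+1) sign
    else (bump, sign)
  else (bump, sign)
termination_by cs.length - k

-- outer `for i in range(len(exp)-1)` loop; slices exp[:i] / exp[i+bump:] have nonnegative
-- in-range bounds, so take/drop are exact
def pvOuterA (cs : List Char) (i : Nat) : Option (List Char) :=
  if i + 1 < cs.length then
    if (cs.getD i ' ' == '-' || cs.getD i ' ' == '+') &&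
       (cs.getD (i+1) ' ' == '-' || cs.getD (i+1) ' ' == '+') then
      let r := pvInnerA cs i 0 1
      if r.2 == -1 then some (cs.take i ++ '-' :: cs.drop (i + r.1))
      else if i ≠ 0 then some (cs.take i ++ '+' :: cs.drop (i + r.1))
      else some (cs.drop (i + r.1))
    else pvOuterA cs (i+1)
  else none
termination_by cs.length - i

def signExpression (exp : String) : Option String :=
  (pvOuterA exp.toList 0).map String.mk

-- ===== PORT B =====
-- Source B's while-loop: one pass with state (j, run_start, minus); returns (i, j, minus) of the
-- first sign run of length >= 2 (the empty-list arm is the post-loop check)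
def pvScanB : List Char → Nat → Option Nat → Nat → Option (Nat × Nat × Nat)
  | [], j, runStart, minus =>
    match runStart with
    | some r => if 2 ≤ j - r then some (r, j, minus) else none
    | none => none
  | c :: cs, j, runStart, minus =>
    if c == '+' || c == '-' then
      let r := match runStart with | none => j | some r => r
      let m := match runStart with | none => 0 | some _ => minus
      pvScanB cs (j + 1) (some r) (m + if c == '-' then 1 else 0)
    else
      match runStart with
      | some r => if 2 ≤ j - r then some (r, j, minus) else pvScanB cs (j + 1) none 0
      | none => pvScanB cs (j + 1) none 0

-- slices exp[:i] / exp[j:] have nonnegative in-range bounds, so take/drop are exact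
def signExpression_alt (exp : String) : Option String :=
  match pvScanB exp.toList 0 none 0 with
  | none => none
  | some (i, j, minus) =>
    some (String.mk (exp.toList.take i ++
      (if minus % 2 == 1 then ['-'] else if i == 0 then [] else ['+']) ++
      exp.toList.drop j))

-- ===== PRECONDITION & SPEC =====
def Spec_signExpression (exp : String) (out : Option String) : Prop := out = signExpression_alt exp
instance (exp : String) (out : Option String) : Decidable (Spec_signExpression exp out) := by unfold Spec_signExpression; infer_instance

-- ===== CLAIM (what is proved, stated in full; the proofs are below) =====
def Claim_equal_signExpression : Prop := ∀ (exp : String), Dom_signExpression exp → Spec_signExpression exp (signExpression exp)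

-- ===== LEMMAS AND PROOFS =====
def pvIsSign (c : Char) : Bool := c == '+' || c == '-'

theorem pv_getD_append_len (pre : List Char) (c : Char) (cs : List Char) :
    (pre ++ c :: cs).getD pre.length ' ' = c := by
  induction pre with
  | nil => rfl
  | cons a t ih => simpa using ih

theorem pv_innerA_spec (cs : List Char) : ∀ (pre : List Char) (b : Nat) (s : Int),
    pvInnerA (pre ++ cs) pre.length b s =
      (b + (cs.takeWhile pvIsSign).length,
       if (cs.takeWhile pvIsSign).count '-' % 2 == 1 then -s else s) := by
  induction cs with
  | nil =>
    intro pre b s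
    rw [pvInnerA]
    simp [List.takeWhile]
  | cons c rest ih =>
    intro pre b s
    rw [pvInnerA]
    have hlt : pre.length < (pre ++ c :: rest).length := by simp
    have hg := pv_getD_append_len pre c rest
    by_cases hm : c = '-'
    · subst hm
      simp only [hlt, if_pos, hg]
      have := ih (pre ++ ['-']) (b + 1) (s * (-1))
      simp only [List.append_assoc, List.cons_append, List.nil_append,
        List.length_append, List.length_cons, List.length_nil] at this
      rw [show pre.length + 1 = pre.length + (0 + 1) by omega] at this
      simp only [Nat.zero_add] at this
      rw [this]
      simp only [List.takeWhile, pvIsSign, show ('-' == '+') = false by decide,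
        show ('-' == '-') = true by decide, Bool.false_or, if_pos,
        List.length_cons, List.count_cons, if_pos, BEq.rfl]
      rcases Nat.even_or_odd ((List.takeWhile pvIsSign rest).count '-') with h | h
      · obtain ⟨k, hk⟩ := h
        have h1 : ((List.takeWhile pvIsSign rest).count '-' % 2 == 1) = false := by
          simp only [Bool.eq_false_iff, ne_eq, beq_iff_eq]; omega
        have h2 : (((List.takeWhile pvIsSign rest).count '-' + 1) % 2 == 1) = true := by
          simp only [beq_iff_eq]; omega
        simp only [h1, h2, Bool.false_eq_true, if_false, if_true, Prod.mk.injEq]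
        exact ⟨by omega, by ring⟩
      · obtain ⟨k, hk⟩ := h
        have h1 : ((List.takeWhile pvIsSign rest).count '-' % 2 == 1) = true := by
          simp only [beq_iff_eq]; omega
        have h2 : (((List.takeWhile pvIsSign rest).count '-' + 1) % 2 == 1) = false := by
          simp only [Bool.eq_false_iff, ne_eq, beq_iff_eq]; omega
        simp only [h1, h2, Bool.false_eq_true, if_false, if_true, Prod.mk.injEq]
        exact ⟨by omega, by ring⟩
    · by_cases hp : c = '+'
      · subst hp
        simp only [hlt, if_pos, hg]
        have hne : ('+' == '-') = false := by decide
        simp only [hne, Bool.false_eq_true, if_false, if_pos (by decide : ('+' == '+') = true)]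
        have := ih (pre ++ ['+']) (b + 1) s
        simp only [List.append_assoc, List.cons_append, List.nil_append,
          List.length_append, List.length_cons, List.length_nil] at this
        rw [show pre.length + 1 = pre.length + (0 + 1) by omega] at this
        simp only [Nat.zero_add] at this
        rw [this]
        simp [List.takeWhile, pvIsSign, List.count_cons]
        omega
      · simp only [hlt, if_pos, hg]
        have h1 : (c == '-') = false := by simp [hm]
        have h2 : (c == '+') = false := by simp [hp]
        have h3 : pvIsSign c = false := by simp [pvIsSign, h1, h2]
        simp [h1, h2, List.takeWhile, h3]

theorem pv_drop_takeWhile (p : Char → Bool) (l : List Char) :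
    l.drop (l.takeWhile p).length = l.dropWhile p := by
  induction l with
  | nil => rfl
  | cons c rest ih =>
    by_cases h : p c <;> simp [List.takeWhile, List.dropWhile, h, ih]

theorem pv_sign_comm (c : Char) : (c == '-' || c == '+') = pvIsSign c := by
  simp [pvIsSign, Bool.or_comm]

theorem pv_run2 (cs : List Char) : ∀ (p r m : Nat), r + 2 ≤ p →
    pvScanB cs p (some r) m =
      some (r, p + (cs.takeWhile pvIsSign).length, m + (cs.takeWhile pvIsSign).count '-') := by
  induction cs with
  | nil =>
    intro p r m hp
    have h2 : 2 ≤ p - r := by omega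
    simp [pvScanB, h2]
  | cons c cs ih =>
    intro p r m hp
    by_cases h : pvIsSign c
    · have h' : (c == '+' || c == '-') = true := h
      rw [pvScanB]
      simp only [h', if_true]
      rw [ih (p + 1) r (m + if c == '-' then 1 else 0) (by omega)]
      simp only [List.takeWhile, h, List.length_cons, List.count_cons, Option.some.injEq,
        Prod.mk.injEq, true_and]
      constructor
      · omega
      · by_cases hc : c = '-' <;> simp [hc] <;> omega
    · have h' : (c == '+' || c == '-') = false := by simpa [pvIsSign] using h
      have h2 : 2 ≤ p - r := by omega
      rw [pvScanB]
      simp [h', List.takeWhile, h, h2]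

theorem pv_main (cs : List Char) : ∀ (pre : List Char),
    pvOuterA (pre ++ cs) pre.length =
      match pvScanB cs pre.length none 0 with
      | none => none
      | some (i, j, minus) =>
        some ((pre ++ cs).take i ++
          (if minus % 2 == 1 then ['-'] else if i == 0 then [] else ['+']) ++
          (pre ++ cs).drop j) := by
  induction cs with
  | nil =>
    intro pre
    rw [pvOuterA]
    simp [pvScanB]
  | cons c1 t ih =>
    intro pre
    cases t with
    | nil =>
      rw [pvOuterA]
      by_cases h : pvIsSign c1
      · have h' : (c1 == '+' || c1 == '-') = true := h
        simp [pvScanB, h']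
      · have h' : (c1 == '+' || c1 == '-') = false := by simpa [pvIsSign] using h
        simp [pvScanB, h']
    | cons c2 rest =>
      rw [pvOuterA]
      have hlt : pre.length + 1 < (pre ++ c1 :: c2 :: rest).length := by simp
      have hg1 : (pre ++ c1 :: c2 :: rest).getD pre.length ' ' = c1 :=
        pv_getD_append_len pre c1 (c2 :: rest)
      have hg2 : (pre ++ c1 :: c2 :: rest).getD (pre.length + 1) ' ' = c2 := by
        have := pv_getD_append_len (pre ++ [c1]) c2 rest
        simpa using this
      simp only [hlt, if_pos, hg1, hg2, pv_sign_comm]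
      by_cases hs1 : pvIsSign c1
      · have h1' : (c1 == '+' || c1 == '-') = true := hs1
        by_cases hs2 : pvIsSign c2
        · -- first double-sign pair found here
          have h2' : (c2 == '+' || c2 == '-') = true := hs2
          have hs : (pvIsSign c1 && pvIsSign c2) = true := by simp [hs1, hs2]
          rw [if_pos hs]
          have hin := pv_innerA_spec (c1 :: c2 :: rest) pre 0 1
          rw [pvScanB]
          simp only [h1', if_true]
          rw [pvScanB]
          simp only [h2', if_true]
          rw [pv_run2 rest (pre.length + 1 + 1) pre.length _ (by omega)]
          simp only [hin, Nat.zero_add]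
          have htw : (c1 :: c2 :: rest).takeWhile pvIsSign =
              c1 :: c2 :: rest.takeWhile pvIsSign := by
            simp [List.takeWhile, hs1, hs2]
          have hdrop : (pre ++ c1 :: c2 :: rest).drop
              (pre.length + ((c1 :: c2 :: rest).takeWhile pvIsSign).length) =
              (c1 :: c2 :: rest).dropWhile pvIsSign := by
            rw [List.drop_append, List.drop_eq_nil_of_le (by omega), Nat.add_sub_cancel_left,
              List.nil_append, pv_drop_takeWhile]
          have hcnt : ((if c1 == '-' then 1 else 0) + if c2 == '-' then 1 else 0) +
              (rest.takeWhile pvIsSign).count '-' =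
              ((c1 :: c2 :: rest).takeWhile pvIsSign).count '-' := by
            rw [htw]
            simp only [List.count_cons]
            by_cases hc1 : c1 = '-' <;> by_cases hc2 : c2 = '-' <;> simp [hc1, hc2] <;> omega
          have hlen : pre.length + 1 + 1 + (rest.takeWhile pvIsSign).length =
              pre.length + ((c1 :: c2 :: rest).takeWhile pvIsSign).length := by
            rw [htw]; simp; omega
          rw [hlen, hcnt]
          by_cases hodd : (((c1 :: c2 :: rest).takeWhile pvIsSign).count '-' % 2 == 1) = true
          · simp only [hodd, if_true, show ((-1 : Int) == -1) = true by decide]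
            simp [List.take_left, hdrop]
          · simp only [hodd, Bool.false_eq_true, if_false,
              show ((1 : Int) == -1) = false by decide]
            by_cases hpre : pre = []
            · subst hpre
              simp [hdrop, pv_drop_takeWhile]
            · have hlen0 : pre.length ≠ 0 := by simpa using hpre
              simp [hlen0, List.take_left, hdrop]
        · -- single sign then non-sign: both sides fall through to position pre.length + 2
          have h2' : (c2 == '+' || c2 == '-') = false := by simpa [pvIsSign] using hs2
          have hs : ¬((pvIsSign c1 && pvIsSign c2) = true) := by simp [hs2]
          rw [if_neg hs]
          have h2 := ih (pre ++ [c1])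
          simp only [List.append_assoc, List.singleton_append, List.length_append,
            List.length_cons, List.length_nil, Nat.zero_add] at h2
          rw [h2]
          have e1 : pvScanB (c1 :: c2 :: rest) pre.length none 0
              = pvScanB rest (pre.length + 1 + 1) none 0 := by
            rw [pvScanB]
            simp only [h1', if_true]
            rw [pvScanB]
            simp [h2', show ¬(2 ≤ pre.length + 1 - pre.length) from by omega]
          have e2 : pvScanB (c2 :: rest) (pre.length + 1) none 0
              = pvScanB rest (pre.length + 1 + 1) none 0 := by
            rw [pvScanB]
            simp [h2']
          rw [e1, e2]
          cases pvScanB rest (pre.length + 1 + 1) none 0 <;> simp [List.append_assoc]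
      · -- non-sign head: both sides move to position pre.length + 1
        have h1' : (c1 == '+' || c1 == '-') = false := by simpa [pvIsSign] using hs1
        have hs : ¬((pvIsSign c1 && pvIsSign c2) = true) := by simp [hs1]
        rw [if_neg hs]
        have h2 := ih (pre ++ [c1])
        simp only [List.append_assoc, List.singleton_append, List.length_append,
          List.length_cons, List.length_nil, Nat.zero_add] at h2
        rw [h2]
        have e1 : pvScanB (c1 :: c2 :: rest) pre.length none 0
            = pvScanB (c2 :: rest) (pre.length + 1) none 0 := by
          rw [pvScanB]
          simp [h1']
        rw [e1]
        cases pvScanB (c2 :: rest) (pre.length + 1) none 0 <;> simp [List.append_assoc]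

-- ===== VERDICT (by name: the statement is the Claim_ definition above) =====
theorem signExpression_spec : Claim_equal_signExpression := by
  intro exp _
  unfold Spec_signExpression signExpression signExpression_alt
  have h := pv_main exp.toList []
  simp only [List.nil_append, List.length_nil] at h
  rw [h]
  cases pvScanB exp.toList 0 none 0 with
  | none => rfl
  | some v => rfl
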